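-- pv_equiv track=rewrite | github.com/NicoleZlq/Part_B_TRO_Env | skip_toy_departure_1.py | FindNewAction
-- ===== SOURCE A (Python) =====
-- def FindNewAction(numbers, target):
--
--     closest_number = None
--     min_difference = float('inf')
--
--     for number in numbers:
--         if number >= target:
--             difference = number - target
--             if difference < min_difference:
--                 min_difference = difference
--                 closest_number = number
--
--     return closest_number
-- ===== SOURCE B (Python) =====
-- def FindNewAction(numbers, target):
--     for n in sorted(numbers):
--         if n >= target:
--             return n
--     return None
-- ===== Notes on version B (the rewrite author's own statement) =====
-- stated objective: alternative
-- what changed: Replaces A's single-pass min-difference tracking with a sort-then-scan algorithm: sort the list ascending and return the first element >= target (correct because in sorted order the first qualifying element is the smallest one).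
import Mathlib
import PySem

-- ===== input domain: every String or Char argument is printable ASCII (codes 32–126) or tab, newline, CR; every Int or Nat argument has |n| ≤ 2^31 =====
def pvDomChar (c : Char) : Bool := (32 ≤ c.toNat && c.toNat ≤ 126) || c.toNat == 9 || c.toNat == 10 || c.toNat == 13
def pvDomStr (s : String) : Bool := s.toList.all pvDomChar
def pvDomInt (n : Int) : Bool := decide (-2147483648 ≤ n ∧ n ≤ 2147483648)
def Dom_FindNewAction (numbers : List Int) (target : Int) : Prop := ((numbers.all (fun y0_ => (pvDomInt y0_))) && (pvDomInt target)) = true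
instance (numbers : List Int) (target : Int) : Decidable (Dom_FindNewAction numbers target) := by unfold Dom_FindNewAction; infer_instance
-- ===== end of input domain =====

-- B replaces A's single-pass min-difference tracking with sort-then-scan: sort ascending, return the first element ≥ target (alternative algorithm).

-- ===== PORT A =====
-- loop body of A: state = (closest_number, min_difference); none in the second slot = float('inf')
def pvStep (target : Int) (st : Option Int × Option Int) (n : Int) : Option Int × Option Int :=
  if target ≤ n then
    let d := n - target
    match st.2 with
    | none => (some n, some d)
    | some m => if d < m then (some n, some d) else st
  else st

def FindNewAction (numbers : List Int) (target : Int) : Option Int :=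
  (numbers.foldl (pvStep target) ((none : Option Int), (none : Option Int))).1

-- ===== PORT B =====
-- Source B: 'for n in sorted(numbers): if n >= target: return n; return None' — the
-- early-return scan over the sorted list is List.find? over PySem.List.sorted.
def FindNewAction_alt (numbers : List Int) (target : Int) : Option Int :=
  (PySem.List.sorted numbers (fun x => x) false).find? (fun n => decide (target ≤ n))

-- ===== PRECONDITION & SPEC =====
def Spec_FindNewAction (numbers : List Int) (target : Int) (out : Option Int) : Prop := out = FindNewAction_alt numbers target
instance (numbers : List Int) (target : Int) (out : Option Int) : Decidable (Spec_FindNewAction numbers target out) := by unfold Spec_FindNewAction; infer_instance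

-- ===== CLAIM (what is proved, stated in full; the proofs are below) =====
def Claim_equal_FindNewAction : Prop := ∀ (numbers : List Int) (target : Int), Dom_FindNewAction numbers target → Spec_FindNewAction numbers target (FindNewAction numbers target)

-- ===== LEMMAS AND PROOFS =====

-- A's fold, once it has found a candidate c, keeps the running minimum of the qualifying elements.
theorem pvStep_some (target c n : Int) :
    pvStep target (some c, some (c - target)) n
      = if target ≤ n then (some (min c n), some (min c n - target))
        else (some c, some (c - target)) := by
  simp only [pvStep]
  split_ifs with h h2
  · simp only [Prod.mk.injEq, Option.some.injEq]
    constructor <;> omega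
  · simp only [Prod.mk.injEq, Option.some.injEq]
    constructor <;> omega
  · rfl

theorem foldl_pvStep_some (target : Int) (l : List Int) (c : Int) :
    l.foldl (pvStep target) (some c, some (c - target))
      = (some ((l.filter (fun n => decide (target ≤ n))).foldl min c),
         some ((l.filter (fun n => decide (target ≤ n))).foldl min c - target)) := by
  induction l generalizing c with
  | nil => rfl
  | cons n t ih =>
    rw [List.foldl_cons, pvStep_some]
    by_cases h : target ≤ n
    · simp [h, ih]
    · simp [h, ih]

-- A computes exactly the minimum of the qualifying elements.
theorem FindNewAction_eq_min? (numbers : List Int) (target : Int) :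
    FindNewAction numbers target = (numbers.filter (fun n => decide (target ≤ n))).min? := by
  unfold FindNewAction
  induction numbers with
  | nil => rfl
  | cons n t ih =>
    rw [List.foldl_cons]
    by_cases h : target ≤ n
    · have hstep : pvStep target ((none : Option Int), (none : Option Int)) n
          = (some n, some (n - target)) := by
        simp [pvStep, h]
      rw [hstep, foldl_pvStep_some]
      simp [h, List.min?]
    · have hstep : pvStep target ((none : Option Int), (none : Option Int)) n
          = ((none : Option Int), (none : Option Int)) := by
        simp [pvStep, h]
      rw [hstep]
      simp only [List.filter_cons, h, decide_false]
      exact ih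

-- min? only depends on the multiset of elements.
theorem min?_perm (l m : List Int) (h : l.Perm m) : l.min? = m.min? := by
  cases hl : l.min? with
  | none =>
    rw [List.min?_eq_none_iff] at hl
    subst hl
    rw [← h.nil_eq]
    rfl
  | some a =>
    rw [List.min?_eq_some_iff] at hl
    symm
    rw [List.min?_eq_some_iff]
    exact ⟨h.mem_iff.mp hl.1, fun b hb => hl.2 b (h.mem_iff.mpr hb)⟩

-- On an ascending list, the first element ≥ target is the minimum of the elements ≥ target.
theorem find?_sorted_eq_min? (target : Int) (l : List Int)
    (hs : l.Pairwise (fun a b => a ≤ b)) :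
    l.find? (fun n => decide (target ≤ n))
      = (l.filter (fun n => decide (target ≤ n))).min? := by
  induction l with
  | nil => rfl
  | cons a t ih =>
    rw [List.pairwise_cons] at hs
    by_cases h : target ≤ a
    · rw [List.find?_cons_of_pos (by simpa using h)]
      rw [List.filter_cons_of_pos (by simpa using h)]
      symm
      rw [List.min?_eq_some_iff]
      refine ⟨List.mem_cons_self, ?_⟩
      intro b hb
      rcases List.mem_cons.mp hb with hb | hb
      · omega
      · exact hs.1 b (List.mem_of_mem_filter hb)
    · rw [List.find?_cons_of_neg (by simpa using h)]
      rw [List.filter_cons_of_neg (by simpa using h)]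
      exact ih hs.2

theorem FindNewAction_eq_alt (numbers : List Int) (target : Int) :
    FindNewAction numbers target = FindNewAction_alt numbers target := by
  rw [FindNewAction_eq_min?]
  unfold FindNewAction_alt
  rw [find?_sorted_eq_min? target _ (PySem.List.sorted_pairwise numbers (fun x => x))]
  exact (min?_perm _ _ ((PySem.List.sorted_perm numbers (fun x => x) false).filter _)).symm

-- ===== VERDICT (by name: the statement is the Claim_ definition above) =====
theorem FindNewAction_spec : Claim_equal_FindNewAction := by
  intro numbers target _
  exact FindNewAction_eq_alt numbers target
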